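-- pv_equiv track=rewrite | github.com/anonymous200002/TVinterleave | CI-VID_construction_functions/clip_similarity_detection_and_segment.py | find_subsequences_with_conditions
-- ===== SOURCE A (Python) =====
-- def find_subsequences_with_conditions(lst, max_gap=5, min_length=2):
--     subsequences = []  # 用来存储符合条件的子串的列表
--
--     if len(lst) == 0:
--         return []
--
--     # 变量初始化
--     current_subseq = [lst[0]]  # 初始子串包含第一个元素
--
--     for i in range(1, len(lst)):
--         # 判断当前数字与前一个数字的差是否在允许的最大间隔内
--         current_value = int(lst[i].split('/')[-1].split('_')[0])
--         prev_value = int(lst[i - 1].split('/')[-1].split('_')[0])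
--
--         # 判断当前数字与前一个数字的差是否在最大间隔范围内
--         if current_value - prev_value <= max_gap:
--             # 如果当前子串的长度小于 10，添加当前元素
--             if len(current_subseq) < 10:
--                 current_subseq.append(lst[i])  # 如果符合条件，则加入当前子串
--             else:
--                 # 如果当前子串已满，添加到结果列表，并开始新的子串
--                 subsequences.append(current_subseq)
--                 current_subseq = [lst[i]]  # 重新开始新的子串
--         else:
--             # 如果当前子串的长度大于最小长度，则添加到结果
--             if len(current_subseq) >= min_length:
--                 subsequences.append(current_subseq)
--             current_subseq = [lst[i]]  # 重新开始新的子串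
--
--     # 最后检查一次当前子串，确保它被添加到结果中
--     if len(current_subseq) >= min_length:
--         subsequences.append(current_subseq)
--
--     return subsequences
-- ===== SOURCE B (Python) =====
-- def find_subsequences_with_conditions(lst, max_gap=5, min_length=2):
--     def val(s):
--         return int(s.split('/')[-1].split('_')[0])
--
--     # phase 1: split lst into maximal runs where each adjacent gap is <= max_gap
--     runs = []
--     prev = None
--     for x in lst:
--         if runs and val(x) - val(prev) <= max_gap:
--             runs[-1].append(x)
--         else:
--             runs.append([x])
--         prev = x
--
--     # phase 2: slice each run into chunks of 10; full chunks are kept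
--     # unconditionally, the trailing chunk only if it reaches min_length
--     out = []
--     for run in runs:
--         chunks = []
--         r = run
--         while r:
--             chunks.append(r[:10])
--             r = r[10:]
--         out.extend(chunks[:-1])
--         if len(chunks[-1]) >= min_length:
--             out.append(chunks[-1])
--     return out
-- ===== Notes on version B (the rewrite author's own statement) =====
-- stated objective: alternative
-- what changed: Replaces A's stateful flush-on-full / flush-on-break loop by a two-phase pass: first split the list into maximal runs whose adjacent gaps are <= max_gap, then slice each run into chunks of 10, keeping every full chunk unconditionally and the trailing chunk only if it reaches min_length.
import Mathlib
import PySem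

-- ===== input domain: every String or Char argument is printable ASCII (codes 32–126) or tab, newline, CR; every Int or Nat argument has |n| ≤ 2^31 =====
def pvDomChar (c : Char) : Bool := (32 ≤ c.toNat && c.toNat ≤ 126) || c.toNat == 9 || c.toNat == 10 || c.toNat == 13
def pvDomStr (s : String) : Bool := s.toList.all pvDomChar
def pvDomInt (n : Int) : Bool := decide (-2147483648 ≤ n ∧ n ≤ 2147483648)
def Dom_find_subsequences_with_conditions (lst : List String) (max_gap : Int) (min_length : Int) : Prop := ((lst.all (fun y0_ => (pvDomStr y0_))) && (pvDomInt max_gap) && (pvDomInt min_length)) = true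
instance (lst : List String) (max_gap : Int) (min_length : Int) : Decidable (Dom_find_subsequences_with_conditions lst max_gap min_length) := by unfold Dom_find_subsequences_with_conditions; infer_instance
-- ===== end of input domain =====

-- B replaces A's flush-on-full/flush-on-break state machine by split-into-runs then chunk-by-10 (alternative decomposition, same cost).


-- ===== PORT A =====
-- int(s.split('/')[-1].split('_')[0]); total stand-in (the .getD 0 branch is unreachable inside Pre_)
def pvTok (s : String) : String :=
  ((PySem.Str.split? (((PySem.Str.split? s "/").getD []).getLastD "") "_").getD []).headD ""
def pvVal (s : String) : Int := (PySem.Int.ofStr? (pvTok s)).getD 0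

def pvGoA (g m : Int) (prev : String) (rest : List String) (subs : List (List String)) (cur : List String) : List (List String) :=
  match rest with
  | [] => if m ≤ (cur.length : Int) then subs ++ [cur] else subs
  | x :: xs =>
    if pvVal x - pvVal prev ≤ g then
      if cur.length < 10 then pvGoA g m x xs subs (cur ++ [x])
      else pvGoA g m x xs (subs ++ [cur]) [x]
    else
      if m ≤ (cur.length : Int) then pvGoA g m x xs (subs ++ [cur]) [x]
      else pvGoA g m x xs subs [x]

def find_subsequences_with_conditions (lst : List String) (max_gap : Int) (min_length : Int) : List (List String) :=
  match lst with
  | [] => []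
  | h :: t => pvGoA max_gap min_length h t [] [h]

-- ===== PORT B =====
-- phase 1: maximal runs with adjacent gap ≤ max_gap (acc = run under construction, prev = its last element)
def pvRunsGo (g : Int) (prev : String) (acc : List String) (rest : List String) : List (List String) :=
  match rest with
  | [] => [acc]
  | x :: xs =>
    if pvVal x - pvVal prev ≤ g then pvRunsGo g x (acc ++ [x]) xs
    else acc :: pvRunsGo g x [x] xs

-- phase 2: chunks of 10 (the while r: chunks.append(r[:10]); r = r[10:] loop)
def pvChunk10 (l : List String) : List (List String) :=
  if l = [] then [] else l.take 10 :: pvChunk10 (l.drop 10)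
termination_by l.length
decreasing_by
  simp only [List.length_drop]
  have : 0 < l.length := List.length_pos_iff.mpr (by assumption)
  omega

def pvProcRun (m : Int) (run : List String) : List (List String) :=
  let cs := pvChunk10 run
  cs.dropLast ++ (if m ≤ ((cs.getLastD []).length : Int) then [cs.getLastD []] else [])

def find_subsequences_with_conditions_alt (lst : List String) (max_gap : Int) (min_length : Int) : List (List String) :=
  match lst with
  | [] => []
  | h :: t => (pvRunsGo max_gap h [h] t).flatMap (pvProcRun min_length)

-- ===== PRECONDITION & SPEC =====
-- Pre_ excludes exactly the inputs where Python A raises ValueError: lists of ≥ 2 elements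
-- containing an element whose '/'-tail's '_'-head is not int()-parseable (A parses every element then).
def Pre_find_subsequences_with_conditions (lst : List String) (max_gap : Int) (min_length : Int) : Prop :=
  lst.length ≤ 1 ∨ ∀ s ∈ lst, (PySem.Int.ofStr? (pvTok s)).isSome = true
instance (lst : List String) (max_gap : Int) (min_length : Int) : Decidable (Pre_find_subsequences_with_conditions lst max_gap min_length) := by unfold Pre_find_subsequences_with_conditions; infer_instance
def pvWitness_find_subsequences_with_conditions : List String × Int × Int := (["a/3", "a/5_x", "a/20"], 5, 2)

def Spec_find_subsequences_with_conditions (lst : List String) (max_gap : Int) (min_length : Int) (out : List (List String)) : Prop := out = find_subsequences_with_conditions_alt lst max_gap min_length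
instance (lst : List String) (max_gap : Int) (min_length : Int) (out : List (List String)) : Decidable (Spec_find_subsequences_with_conditions lst max_gap min_length out) := by unfold Spec_find_subsequences_with_conditions; infer_instance

-- ===== CLAIM (what is proved, stated in full; the proofs are below) =====
def Claim_equal_find_subsequences_with_conditions : Prop := ∀ (lst : List String) (max_gap : Int) (min_length : Int), Dom_find_subsequences_with_conditions lst max_gap min_length → Pre_find_subsequences_with_conditions lst max_gap min_length → Spec_find_subsequences_with_conditions lst max_gap min_length (find_subsequences_with_conditions lst max_gap min_length)

-- ===== LEMMAS AND PROOFS =====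

-- cont/tail decomposition of pvRunsGo (proof-side only)
def pvCont (g : Int) (prev : String) : List String → List String
  | [] => []
  | x :: xs => if pvVal x - pvVal prev ≤ g then x :: pvCont g x xs else []

def pvTail (g : Int) (prev : String) : List String → List (List String)
  | [] => []
  | x :: xs => if pvVal x - pvVal prev ≤ g then pvTail g x xs else pvRunsGo g x [x] xs

theorem pvRunsGo_shape (g : Int) : ∀ (rest : List String) (prev : String) (acc : List String),
    pvRunsGo g prev acc rest = (acc ++ pvCont g prev rest) :: pvTail g prev rest := by
  intro rest
  induction rest with
  | nil => intro prev acc; simp [pvRunsGo, pvCont, pvTail]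
  | cons x xs ih =>
    intro prev acc
    simp only [pvRunsGo, pvCont, pvTail]
    split_ifs with h
    · rw [ih]; simp
    · simp

theorem pvGoA_acc (g m : Int) : ∀ (rest : List String) (prev : String) (subs : List (List String)) (cur : List String),
    pvGoA g m prev rest subs cur = subs ++ pvGoA g m prev rest [] cur := by
  intro rest
  induction rest with
  | nil => intro prev subs cur; simp [pvGoA]; split_ifs <;> simp
  | cons x xs ih =>
    intro prev subs cur
    simp only [pvGoA]
    split_ifs with h1 h2 h3
    · exact ih x subs (cur ++ [x])
    · rw [ih x (subs ++ [cur]) [x], ih x ([] ++ [cur]) [x]]; simp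
    · rw [ih x (subs ++ [cur]) [x], ih x ([] ++ [cur]) [x]]; simp
    · exact ih x subs [x]

theorem pvChunk10_ne_nil {l : List String} (h : l ≠ []) : pvChunk10 l ≠ [] := by
  rw [pvChunk10]; simp [h]

theorem pvChunk10_append10 {cur : List String} (w : List String) (h : cur.length = 10) :
    pvChunk10 (cur ++ w) = cur :: pvChunk10 w := by
  have hne : cur ++ w ≠ [] := by
    intro hc; have := congrArg List.length hc; simp [h] at this
  rw [pvChunk10]
  simp only [hne, if_false]
  congr 1
  · rw [← h, List.take_left]
  · rw [show (10 : ℕ) = cur.length from h.symm, List.drop_left]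

theorem pvProcRun_append10 {cur : List String} {w : List String} (m : Int)
    (h : cur.length = 10) (hw : w ≠ []) :
    pvProcRun m (cur ++ w) = cur :: pvProcRun m w := by
  have hcw := pvChunk10_ne_nil hw
  obtain ⟨a, as, hx⟩ : ∃ a as, pvChunk10 w = a :: as := by
    cases hxx : pvChunk10 w with
    | nil => exact absurd hxx hcw
    | cons a as => exact ⟨a, as, rfl⟩
  simp only [pvProcRun, pvChunk10_append10 w h, hx]
  simp [List.getLastD]

theorem pvProcRun_small {l : List String} (m : Int) (h0 : l ≠ []) (h10 : l.length ≤ 10) :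
    pvProcRun m l = if m ≤ (l.length : Int) then [l] else [] := by
  have hc : pvChunk10 l = [l] := by
    rw [pvChunk10]
    simp [h0, List.take_of_length_le h10, List.drop_eq_nil_of_le h10, pvChunk10]
  simp [pvProcRun, hc]

theorem pvMain (g m : Int) : ∀ (rest : List String) (prev : String) (cur : List String),
    cur ≠ [] → cur.length ≤ 10 →
    pvGoA g m prev rest [] cur = (pvRunsGo g prev cur rest).flatMap (pvProcRun m) := by
  intro rest
  induction rest with
  | nil =>
    intro prev cur h0 h10
    simp [pvGoA, pvRunsGo, pvProcRun_small m h0 h10]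
  | cons x xs ih =>
    intro prev cur h0 h10
    simp only [pvGoA, pvRunsGo]
    split_ifs with h1 h2 h3
    · -- gap ok, room in cur
      exact ih x (cur ++ [x]) (by simp) (by simp; omega)
    · -- gap ok, cur full (length = 10)
      have hlen : cur.length = 10 := by omega
      rw [pvGoA_acc, ih x [x] (by simp) (by simp)]
      rw [pvRunsGo_shape, pvRunsGo_shape]
      simp only [List.flatMap_cons]
      rw [show (cur ++ [x]) ++ pvCont g x xs = cur ++ ([x] ++ pvCont g x xs) by simp]
      rw [pvProcRun_append10 m hlen (by simp)]
      simp
    · -- break, cur long enough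
      rw [pvGoA_acc, ih x [x] (by simp) (by simp)]
      simp [pvProcRun_small m h0 h10, h3]
    · -- break, cur too short
      rw [ih x [x] (by simp) (by simp)]
      simp [pvProcRun_small m h0 h10, h3]

-- ===== VERDICT (by name: the statement is the Claim_ definition above) =====
theorem find_subsequences_with_conditions_spec : Claim_equal_find_subsequences_with_conditions := by
  intro lst g m _dom _pre
  unfold Spec_find_subsequences_with_conditions
  cases lst with
  | nil => rfl
  | cons h t =>
    simp only [find_subsequences_with_conditions, find_subsequences_with_conditions_alt]
    exact pvMain g m t h [h] (by simp) (by simp)
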